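-- pv_equiv track=rewrite | github.com/YashB63/GFG-Daily-Questions | Day 84/Difficulty of sentence/difficulty_of_sentence.py | is_hard
-- ===== SOURCE A (Python) =====
-- def is_hard(word):
--     vowels = 'aeiouAEIOU'
--     consonants_count = 0
--     consecutive_consonants = 0
--
--     for char in word:
--         if char not in vowels:
--             consonants_count += 1
--             consecutive_consonants += 1
--             if consecutive_consonants == 4:
--                 return True
--         else:
--             consecutive_consonants = 0
--
--     return consonants_count > len(word) - consonants_count
-- ===== SOURCE B (Python) =====
-- def is_hard(word):
--     vowels = 'aeiouAEIOU'
--     n = len(word)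
--     if any(all(c not in vowels for c in word[i:i+4]) for i in range(n - 3)):
--         return True
--     consonants = sum(1 for c in word if c not in vowels)
--     return 2 * consonants > n
-- ===== Notes on version B (the rewrite author's own statement) =====
-- stated objective: alternative
-- what changed: B replaces A's fused single pass with a stateful run counter and early return by two independent idiomatic passes: a sliding-window existence check for 4 consecutive consonants over word[i:i+4], and a separate consonant count compared as 2*consonants > len(word).
import Mathlib
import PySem

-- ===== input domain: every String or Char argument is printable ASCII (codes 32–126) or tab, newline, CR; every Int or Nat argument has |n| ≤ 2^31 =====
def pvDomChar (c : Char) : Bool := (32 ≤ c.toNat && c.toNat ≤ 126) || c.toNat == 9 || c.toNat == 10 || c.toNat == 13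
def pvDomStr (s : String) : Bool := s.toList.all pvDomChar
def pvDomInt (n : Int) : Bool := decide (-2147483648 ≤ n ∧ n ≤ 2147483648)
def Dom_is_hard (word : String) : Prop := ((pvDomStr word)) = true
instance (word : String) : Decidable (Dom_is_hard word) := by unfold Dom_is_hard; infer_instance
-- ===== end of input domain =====

-- B replaces A's fused single pass (run counter + early return) by a sliding-window
-- existence check for 4 consecutive consonants plus a separate consonant count; same cost.

-- shared helper: Python's `char not in 'aeiouAEIOU'`
def isCons (c : Char) : Bool := !(("aeiouAEIOU".toList).contains c)

-- ===== PORT A =====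
-- A's loop over the word with consonant count cc and run counter, early True at run == 4
def goA (total : Nat) : List Char → Nat → Nat → Bool
  | [], cc, _ => decide ((cc : Int) > (total : Int) - (cc : Int))
  | c :: cs, cc, run =>
    if isCons c then
      if run + 1 == 4 then true
      else goA total cs (cc + 1) (run + 1)
    else goA total cs cc 0

def is_hard (word : String) : Bool :=
  goA word.toList.length word.toList 0 0

-- ===== PORT B =====
-- B's generator expression: any window word[i:i+4] of 4 consecutive consonants
def hasWin (l : List Char) : Bool :=
  (List.range (l.length - 3)).any (fun i => ((l.drop i).take 4).all isCons)

def is_hard_alt (word : String) : Bool :=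
  let l := word.toList
  if hasWin l then true
  else decide (2 * (l.filter isCons).length > l.length)

-- ===== PRECONDITION & SPEC =====
def Spec_is_hard (word : String) (out : Bool) : Prop := out = is_hard_alt word
instance (word : String) (out : Bool) : Decidable (Spec_is_hard word out) := by unfold Spec_is_hard; infer_instance

-- ===== CLAIM (what is proved, stated in full; the proofs are below) =====
def Claim_equal_is_hard : Prop := ∀ (word : String), Dom_is_hard word → Spec_is_hard word (is_hard word)

-- ===== LEMMAS AND PROOFS =====

-- proof-side run detector: A's run counter isolated from the count
def win : List Char → Nat → Bool
  | [], _ => false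
  | c :: cs, r => if isCons c then (if r + 1 == 4 then true else win cs (r + 1)) else win cs 0

lemma goA_eq (total : Nat) : ∀ (l : List Char) (cc r : Nat), r ≤ 3 →
    goA total l cc r =
      (win l r || decide (((cc + (l.filter isCons).length : Nat) : Int) >
        (total : Int) - ((cc + (l.filter isCons).length : Nat) : Int))) := by
  intro l
  induction l with
  | nil => intro cc r _; simp [goA, win]
  | cons c cs ih =>
    intro cc r hr
    by_cases h : isCons c = true
    · by_cases h4 : r + 1 = 4
      · simp [goA, win, h, h4]
      · have hr' : r + 1 ≤ 3 := by omega
        have h4' : (r + 1 == 4) = false := by simpa using h4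
        rw [show goA total (c :: cs) cc r = goA total cs (cc + 1) (r + 1) from by
              simp [goA, h, h4'],
            ih (cc + 1) (r + 1) hr',
            show win (c :: cs) r = win cs (r + 1) from by simp [win, h, h4'],
            show ((c :: cs).filter isCons).length = (cs.filter isCons).length + 1 from by simp [h],
            show cc + ((cs.filter isCons).length + 1) = cc + 1 + (cs.filter isCons).length from by
              omega]
    · have := ih cc 0 (by omega)
      simp [goA, win, h, this]

lemma take_all_iff_takeWhile : ∀ (l : List Char) (k : Nat),
    ((l.take k).all isCons = true ∧ k ≤ l.length) ↔ k ≤ (l.takeWhile isCons).length := by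
  intro l
  induction l with
  | nil => intro k; simp
  | cons c cs ih =>
    intro k
    cases k with
    | zero => simp
    | succ k =>
      by_cases h : isCons c = true
      · rw [List.takeWhile_cons_of_pos h]
        simpa [h, Nat.succ_le_succ_iff] using ih k
      · rw [List.takeWhile_cons_of_neg (by simpa using h)]
        simp [h]

lemma tw_hasWin (l : List Char) (h : 4 ≤ (l.takeWhile isCons).length) : hasWin l = true := by
  have h2 := (take_all_iff_takeWhile l 4).2 h
  have hlen : 4 ≤ l.length := h2.2
  unfold hasWin
  rw [List.any_eq_true]
  exact ⟨0, List.mem_range.2 (by omega), by simpa using h2.1⟩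

lemma hasWin_cons (c : Char) (cs : List Char) :
    hasWin (c :: cs) =
      ((((c :: cs).take 4).all isCons && decide (4 ≤ cs.length + 1)) || hasWin cs) := by
  unfold hasWin
  by_cases h : cs.length + 1 ≤ 3
  · rw [show (c :: cs).length - 3 = 0 from by simp; omega,
        show cs.length - 3 = 0 from by omega]
    have h3 : ¬ (4 ≤ cs.length + 1) := by omega
    simp [h3]
  · rw [show (c :: cs).length - 3 = (cs.length - 3) + 1 from by simp; omega,
        List.range_succ_eq_map]
    have h3 : (4 ≤ cs.length + 1) := by omega
    simp [List.any_map, Function.comp_def, List.drop_succ_cons, h3]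

lemma win_eq : ∀ (l : List Char) (r : Nat), r ≤ 3 →
    win l r = (decide (4 ≤ (List.takeWhile isCons l).length + r) || hasWin l) := by
  intro l
  induction l with
  | nil =>
    intro r hr
    simp [win, hasWin]
    omega
  | cons c cs ih =>
    intro r hr
    rw [hasWin_cons]
    by_cases h : isCons c = true
    · have htw : (List.takeWhile isCons (c :: cs)).length
          = (List.takeWhile isCons cs).length + 1 := by
        rw [List.takeWhile_cons_of_pos h]; rfl
      by_cases h4 : r + 1 = 4
      · have h4' : (r + 1 == 4) = true := by simpa using h4
        have hwin : win (c :: cs) r = true := by simp [win, h, h4']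
        have hd : decide (4 ≤ (List.takeWhile isCons (c :: cs)).length + r) = true := by
          rw [decide_eq_true_iff, htw]; omega
        rw [hwin, hd]
        simp
      · have hr' : r + 1 ≤ 3 := by omega
        have h4' : (r + 1 == 4) = false := by simpa using h4
        rw [show win (c :: cs) r = win cs (r + 1) from by simp [win, h, h4'],
            ih (r + 1) hr', htw]
        by_cases hw : (((c :: cs).take 4).all isCons && decide (4 ≤ cs.length + 1)) = true
        · rw [Bool.and_eq_true, decide_eq_true_iff] at hw
          have h4tw : 4 ≤ (List.takeWhile isCons (c :: cs)).length :=
            (take_all_iff_takeWhile (c :: cs) 4).1 ⟨hw.1, by simp; omega⟩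
          rw [htw] at h4tw
          have d1 : decide (4 ≤ (List.takeWhile isCons cs).length + (r + 1)) = true := by
            rw [decide_eq_true_iff]; omega
          have d2 : decide (4 ≤ (List.takeWhile isCons cs).length + 1 + r) = true := by
            rw [decide_eq_true_iff]; omega
          rw [d1, d2]
          simp
        · rw [Bool.not_eq_true] at hw
          rw [hw,
              show (List.takeWhile isCons cs).length + (r + 1)
                = (List.takeWhile isCons cs).length + 1 + r from by omega]
          simp
    · rw [show win (c :: cs) r = win cs 0 from by simp [win, h], ih 0 (by omega),
          List.takeWhile_cons_of_neg (by simpa using h)]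
      have hw0 : (((c :: cs).take 4).all isCons && decide (4 ≤ cs.length + 1)) = false := by
        simp [List.take_succ_cons, h]
      rw [hw0]
      have hnr : ¬ (4 ≤ r) := by omega
      by_cases h4 : 4 ≤ (List.takeWhile isCons cs).length
      · simp [tw_hasWin cs h4, hnr, h4]
      · simp [hnr, h4]

lemma win_zero (l : List Char) : win l 0 = hasWin l := by
  rw [win_eq l 0 (by omega)]
  by_cases h4 : 4 ≤ (l.takeWhile isCons).length
  · simp [tw_hasWin l h4, h4]
  · simp [h4]

-- ===== VERDICT (by name: the statement is the Claim_ definition above) =====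
theorem is_hard_spec : Claim_equal_is_hard := by
  intro word _
  unfold Spec_is_hard is_hard is_hard_alt
  rw [goA_eq _ _ 0 0 (by omega), win_zero]
  have hd : decide (((0 + (word.toList.filter isCons).length : Nat) : Int) >
        (word.toList.length : Int) - ((0 + (word.toList.filter isCons).length : Nat) : Int))
      = decide (2 * (word.toList.filter isCons).length > word.toList.length) := by
    rw [decide_eq_decide]
    push_cast
    omega
  rw [hd]
  cases hw : hasWin word.toList <;> simp [hw]
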